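-- pv_equiv track=rewrite | github.com/Fati1909/alx-interview | 0x01-lockboxes/0-lockboxes.py | canUnlockAll
-- ===== SOURCE A (Python) =====
-- def canUnlockAll(boxes):
--     """ Method that return True if all boxes can be opened,
--     else return False
--     """
--
--     for key in range(1, len(boxes)):
--         flag = False
--         for box in range(len(boxes)):
--             if key in boxes[box] and box != key:
--                 flag = True
--                 break
--         if not flag:
--             return False
--
--     return True
-- ===== SOURCE B (Python) =====
-- def canUnlockAll(boxes):
--     reachable = set()
--     for i, box in enumerate(boxes):
--         for v in box:
--             if v != i:
--                 reachable.add(v)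
--     return all(k in reachable for k in range(1, len(boxes)))
-- ===== Notes on version B (the rewrite author's own statement) =====
-- stated objective: faster
-- what changed: Replaces the per-key scan over all boxes (with an inner membership test) by a single pass that collects every key value found outside its own box index into a set, followed by an O(n) membership check over keys 1..n-1.
import Mathlib
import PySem

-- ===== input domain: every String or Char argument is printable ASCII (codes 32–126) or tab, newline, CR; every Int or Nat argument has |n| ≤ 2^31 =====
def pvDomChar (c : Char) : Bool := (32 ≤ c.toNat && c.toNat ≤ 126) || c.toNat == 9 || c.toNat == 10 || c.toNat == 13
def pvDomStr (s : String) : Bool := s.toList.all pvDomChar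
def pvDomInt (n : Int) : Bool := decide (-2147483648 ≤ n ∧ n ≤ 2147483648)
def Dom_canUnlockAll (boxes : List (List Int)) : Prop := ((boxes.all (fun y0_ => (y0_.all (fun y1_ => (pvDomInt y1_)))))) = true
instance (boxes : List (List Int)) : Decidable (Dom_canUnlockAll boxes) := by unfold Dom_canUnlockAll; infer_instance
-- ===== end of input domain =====

-- B replaces A's per-key scan over all boxes by one pass collecting reachable key values into a set, then an O(n) check (objective: faster, asymptotic).

-- ===== PORT A =====
-- inner 'for box in range(len(boxes)): if key in boxes[box] and box != key: flag = True; break'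
def pvAFlag (boxes : List (List Int)) (key : Int) : Bool :=
  (PySem.List.pyRange 0 (boxes.length : Int) 1).any
    (fun box => decide (key ∈ PySem.List.pyGetD boxes box []) && decide (box ≠ key))

-- outer 'for key in range(1, len(boxes)): … if not flag: return False'
def pvAGo (boxes : List (List Int)) : List Int → Bool
  | [] => true
  | k :: ks => if pvAFlag boxes k then pvAGo boxes ks else false

def canUnlockAll (boxes : List (List Int)) : Bool :=
  pvAGo boxes (PySem.List.pyRange 1 (boxes.length : Int) 1)

-- ===== PORT B =====
-- 'for i, box in enumerate(boxes): for v in box: if v != i: reachable.add(v)'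
def pvBReach (boxes : List (List Int)) : PySem.Set Int :=
  (PySem.List.enumerate boxes 0).foldl
    (fun s p => p.2.foldl (fun s v => if v ≠ p.1 then PySem.Set.add s v else s) s)
    PySem.Set.empty

def canUnlockAll_alt (boxes : List (List Int)) : Bool :=
  (PySem.List.pyRange 1 (boxes.length : Int) 1).all
    (fun k => PySem.Set.contains (pvBReach boxes) k)

-- ===== PRECONDITION & SPEC =====
def Spec_canUnlockAll (boxes : List (List Int)) (out : Bool) : Prop := out = canUnlockAll_alt boxes
instance (boxes : List (List Int)) (out : Bool) : Decidable (Spec_canUnlockAll boxes out) := by unfold Spec_canUnlockAll; infer_instance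

-- ===== CLAIM (what is proved, stated in full; the proofs are below) =====
def Claim_equal_canUnlockAll : Prop := ∀ (boxes : List (List Int)), Dom_canUnlockAll boxes → Spec_canUnlockAll boxes (canUnlockAll boxes)

-- ===== LEMMAS AND PROOFS =====

theorem pvAGo_eq_all (boxes : List (List Int)) (l : List Int) :
    pvAGo boxes l = l.all (pvAFlag boxes) := by
  induction l with
  | nil => rfl
  | cons k ks ih => by_cases h : pvAFlag boxes k <;> simp [pvAGo, h, ih]

theorem pvInner_mem (i x : Int) (box : List Int) (s : PySem.Set Int) :
    (x ∈ box.foldl (fun s v => if v ≠ i then PySem.Set.add s v else s) s) ↔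
      x ∈ s ∨ (x ∈ box ∧ x ≠ i) := by
  induction box generalizing s with
  | nil => simp
  | cons v vs ih =>
    simp only [List.foldl_cons, ih]
    split_ifs with h <;> simp [PySem.Set.mem_add] <;> constructor <;> intro hh <;> aesop

theorem pvBReach_mem (boxes : List (List Int)) (x : Int) :
    x ∈ pvBReach boxes ↔ ∃ p ∈ PySem.List.enumerate boxes 0, x ∈ p.2 ∧ x ≠ p.1 := by
  unfold pvBReach
  generalize PySem.List.enumerate boxes 0 = l
  have : ∀ (l : List (Int × List Int)) (s : PySem.Set Int),
      (x ∈ l.foldl (fun s p => p.2.foldl (fun s v => if v ≠ p.1 then PySem.Set.add s v else s) s) s) ↔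
        x ∈ s ∨ ∃ p ∈ l, x ∈ p.2 ∧ x ≠ p.1 := by
    intro l
    induction l with
    | nil => simp
    | cons p ps ih =>
      intro s
      simp only [List.foldl_cons, ih, pvInner_mem]
      aesop
  simpa using this l PySem.Set.empty

theorem pvFlag_eq_contains (boxes : List (List Int)) (k : Int) :
    pvAFlag boxes k = PySem.Set.contains (pvBReach boxes) k := by
  rw [Bool.eq_iff_iff]
  rw [PySem.Set.contains_iff, pvBReach_mem]
  unfold pvAFlag
  simp only [List.any_eq_true, Bool.and_eq_true, decide_eq_true_eq,
    PySem.List.mem_pyRange_one, PySem.List.mem_enumerate_iff]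
  constructor
  · rintro ⟨b, ⟨hb0, hbn⟩, hmem, hne⟩
    have hlt : b < (boxes.length : Int) := hbn
    have hget : PySem.List.pyGetD boxes b [] = boxes[b.toNat]'(by omega) :=
      PySem.List.pyGetD_eq_getElem boxes [] hb0 hlt
    refine ⟨(b, PySem.List.pyGetD boxes b []), ⟨b.toNat, by omega, ?_⟩, hmem, fun h => hne h.symm⟩
    rw [hget]
    simp
    omega
  · rintro ⟨p, ⟨j, hj, rfl⟩, hmem, hne⟩
    refine ⟨(j : Int), ⟨by omega, by exact_mod_cast hj⟩, ?_, ?_⟩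
    · have hget : PySem.List.pyGetD boxes (j : Int) [] = boxes[((j:Int)).toNat]'(by simpa using hj) :=
        PySem.List.pyGetD_eq_getElem boxes [] (by omega) (by exact_mod_cast hj)
      rw [hget]
      simpa using hmem
    · intro h
      apply hne
      simp [← h]

-- ===== VERDICT (by name: the statement is the Claim_ definition above) =====
theorem canUnlockAll_spec : Claim_equal_canUnlockAll := by
  intro boxes _
  unfold Spec_canUnlockAll canUnlockAll canUnlockAll_alt
  rw [pvAGo_eq_all]
  have hf : pvAFlag boxes = fun k => PySem.Set.contains (pvBReach boxes) k :=
    funext fun k => pvFlag_eq_contains boxes k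
  rw [hf]
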